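-- pv_equiv track=rewrite | github.com/rickardvh/agentic-workspace | packages/planning/src/repo_planning_bootstrap/installer.py | _restore_todo_default_action
-- ===== SOURCE A (Python) =====
-- def _restore_todo_default_action(lines: list[str]) -> list[str]:
--     heading_index = next((index for index, line in enumerate(lines) if line.strip().lower() == "## action"), -1)
--     if heading_index < 0:
--         return lines
--     section_end = len(lines)
--     for index in range(heading_index + 1, len(lines)):
--         if lines[index].startswith("## "):
--             section_end = index
--             break
--     replacement = [
--         "",
--         "- Promote the next bounded candidate only when fresh repeated friction or explicit maintainer choice justifies activation.",
--     ]
--     return lines[: heading_index + 1] + replacement + lines[section_end:]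
-- ===== SOURCE B (Python) =====
-- _DEFAULT_ACTION = [
--     "",
--     "- Promote the next bounded candidate only when fresh repeated friction or explicit maintainer choice justifies activation.",
-- ]
--
--
-- def _restore_todo_default_action(lines: list[str]) -> list[str]:
--     out = []
--     state = 0  # 0 = copying before the heading, 1 = skipping the old section, 2 = copying the tail
--     for line in lines:
--         if state == 0:
--             out.append(line)
--             if line.strip().lower() == "## action":
--                 out.extend(_DEFAULT_ACTION)
--                 state = 1
--         elif state == 1:
--             if line.startswith("## "):
--                 out.append(line)
--                 state = 2
--         else:
--             out.append(line)
--     if state == 0: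
--         return lines
--     return out
-- ===== Notes on version B (the rewrite author's own statement) =====
-- stated objective: alternative
-- what changed: Replaced the three separate scans (index search, end-of-section search, slice concatenation) by a single forward pass state machine that builds the output list while walking the lines once.
import Mathlib
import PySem

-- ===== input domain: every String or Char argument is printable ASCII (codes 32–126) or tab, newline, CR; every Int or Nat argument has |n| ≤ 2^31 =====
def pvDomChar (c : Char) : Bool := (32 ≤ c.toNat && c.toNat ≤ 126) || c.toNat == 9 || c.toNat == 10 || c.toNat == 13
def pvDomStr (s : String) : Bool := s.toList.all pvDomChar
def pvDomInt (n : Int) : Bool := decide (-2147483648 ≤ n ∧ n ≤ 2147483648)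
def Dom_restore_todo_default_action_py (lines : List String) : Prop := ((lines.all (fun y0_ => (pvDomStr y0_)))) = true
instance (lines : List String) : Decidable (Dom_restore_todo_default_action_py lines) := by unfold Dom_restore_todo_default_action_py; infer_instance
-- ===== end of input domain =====

-- B is an alternative one-pass re-implementation (state machine building the output while
-- walking the lines once) of A's find-heading / find-end / slice-and-concatenate approach;
-- same O(n) cost, equal return value on all inputs (A is total).

-- ===== PORT A =====
-- line.strip().lower() == "## action"
def pvCond (l : String) : Bool := PySem.Str.lower (PySem.Str.strip l) == "## action"

-- lines[index].startswith("## ")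
def pvSw (l : String) : Bool := PySem.Str.startswith l "## "

def pvReplacement : List String :=
  ["", "- Promote the next bounded candidate only when fresh repeated friction or explicit maintainer choice justifies activation."]

-- the 'for index in range(heading_index+1, len(lines)) ... break' loop of A, as a scan over
-- the suffix lines[i:] carrying the running index i; returns len(lines) when no break fires
def pvFindEnd : List String → Nat → Nat
  | [], i => i
  | l :: rest, i => if pvSw l then i else pvFindEnd rest (i + 1)

def restore_todo_default_action_py (lines : List String) : List String :=
  -- next((index for index, line in enumerate(lines) if line.strip().lower() == "## action"), -1)
  let heading_index : Int :=
    match lines.findIdx? pvCond with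
    | some i => (i : Int)
    | none => -1
  if heading_index < 0 then lines
  else
    let h : Nat := heading_index.toNat
    let section_end : Nat := pvFindEnd (lines.drop (h + 1)) (h + 1)
    -- lines[: h+1] + replacement + lines[section_end:]  (both bounds nonnegative)
    lines.take (h + 1) ++ pvReplacement ++ lines.drop section_end

-- ===== PORT B =====
-- the for-loop of Source B: state 0 = copying before the heading, 1 = skipping the old
-- section, 2 = copying the tail; returns (out, final state)
def pvAltGo : Nat → List String → List String × Nat
  | st, [] => ([], st)
  | 0, l :: rest =>
    if pvCond l then
      let r := pvAltGo 1 rest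
      (l :: (pvReplacement ++ r.1), r.2)
    else
      let r := pvAltGo 0 rest
      (l :: r.1, r.2)
  | 1, l :: rest =>
    if pvSw l then
      let r := pvAltGo 2 rest
      (l :: r.1, r.2)
    else
      pvAltGo 1 rest
  | st + 2, l :: rest =>
    let r := pvAltGo (st + 2) rest
    (l :: r.1, r.2)

def restore_todo_default_action_py_alt (lines : List String) : List String :=
  let r := pvAltGo 0 lines
  if r.2 = 0 then lines else r.1

-- ===== PRECONDITION & SPEC =====
def Spec_restore_todo_default_action_py (lines : List String) (out : List String) : Prop := out = restore_todo_default_action_py_alt lines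
instance (lines : List String) (out : List String) : Decidable (Spec_restore_todo_default_action_py lines out) := by unfold Spec_restore_todo_default_action_py; infer_instance

-- ===== CLAIM (what is proved, stated in full; the proofs are below) =====
def Claim_equal_restore_todo_default_action_py : Prop := ∀ (lines : List String), Dom_restore_todo_default_action_py lines → Spec_restore_todo_default_action_py lines (restore_todo_default_action_py lines)

-- ===== LEMMAS AND PROOFS =====

-- the suffix of xs starting at its first line that startswith "## " ([] if none)
def pvSfx : List String → List String
  | [] => []
  | l :: rest => if pvSw l then l :: rest else pvSfx rest

theorem pvAltGo_two (xs : List String) : pvAltGo 2 xs = (xs, 2) := by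
  induction xs with
  | nil => rfl
  | cons l rest ih => simp [pvAltGo, ih]

theorem pvAltGo_one (xs : List String) :
    (pvAltGo 1 xs).1 = pvSfx xs ∧ (pvAltGo 1 xs).2 ≠ 0 := by
  induction xs with
  | nil => simp [pvAltGo, pvSfx]
  | cons l rest ih =>
    by_cases h : pvSw l
    · simp [pvAltGo, pvSfx, h, pvAltGo_two]
    · simpa [pvAltGo, pvSfx, h] using ih

theorem pvAltGo_zero_none (xs : List String) (h : ∀ x ∈ xs, pvCond x = false) :
    pvAltGo 0 xs = (xs, 0) := by
  induction xs with
  | nil => rfl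
  | cons l rest ih =>
    have hc : pvCond l = false := h l (by simp)
    have ih' := ih (fun x hx => h x (by simp [hx]))
    simp [pvAltGo, hc, ih']

theorem pvAltGo_zero_some (xs : List String) (k : Nat)
    (h : xs.findIdx? pvCond = some k) : (pvAltGo 0 xs).2 ≠ 0 := by
  induction xs generalizing k with
  | nil => simp at h
  | cons l rest ih =>
    by_cases hc : pvCond l
    · simp [pvAltGo, hc]
      exact (pvAltGo_one rest).2
    · rw [List.findIdx?_cons] at h
      simp [hc] at h
      obtain ⟨j, hj, -⟩ := h
      simpa [pvAltGo, hc] using ih j hj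

theorem pvFindEnd_drop (xs : List String) (i : Nat) (full : List String)
    (h : full.drop i = xs) : full.drop (pvFindEnd xs i) = pvSfx xs := by
  induction xs generalizing i with
  | nil => simpa [pvFindEnd, pvSfx] using h
  | cons l rest ih =>
    by_cases hw : pvSw l
    · simpa [pvFindEnd, pvSfx, hw] using h
    · simp only [pvFindEnd, pvSfx, hw, Bool.false_eq_true, ite_false]
      apply ih
      have : full.drop (i + 1) = (full.drop i).drop 1 := by
        rw [List.drop_drop]
      rw [this, h]
      rfl

theorem pv_main (lines : List String) :
    restore_todo_default_action_py lines = restore_todo_default_action_py_alt lines := by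
  induction lines with
  | nil => rfl
  | cons l rest ih =>
    by_cases hc : pvCond l
    · -- the heading is the first line: A takes [l], replacement, and the suffix from section_end
      have hdrop : (l :: rest).drop (pvFindEnd rest 1) = pvSfx rest :=
        pvFindEnd_drop rest 1 (l :: rest) rfl
      have hfind : (l :: rest).findIdx? pvCond = some 0 := by
        rw [List.findIdx?_cons]; simp [hc]
      have hA : restore_todo_default_action_py (l :: rest)
          = l :: (pvReplacement ++ pvSfx rest) := by
        simp [restore_todo_default_action_py, hfind, hdrop]
      have hB : restore_todo_default_action_py_alt (l :: rest)
          = l :: (pvReplacement ++ pvSfx rest) := by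
        simp [restore_todo_default_action_py_alt, pvAltGo, hc,
          (pvAltGo_one rest).1, (pvAltGo_one rest).2]
      rw [hA, hB]
    · cases hf : rest.findIdx? pvCond with
      | none =>
        have hfind : (l :: rest).findIdx? pvCond = none := by
          rw [List.findIdx?_cons]; simp [hc, hf]
        have hB := pvAltGo_zero_none rest (by
          intro x hx
          exact List.findIdx?_eq_none_iff.mp hf x hx)
        simp [restore_todo_default_action_py, hfind,
          restore_todo_default_action_py_alt, pvAltGo, hc, hB]
      | some k =>
        have hfind : (l :: rest).findIdx? pvCond = some (k + 1) := by
          rw [List.findIdx?_cons]; simp [hc, hf]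
        -- both A-side drops land on the same suffix pvSfx (rest.drop (k+1))
        have hd1 : (l :: rest).drop (pvFindEnd (rest.drop (k + 1)) (k + 1 + 1))
            = pvSfx (rest.drop (k + 1)) :=
          pvFindEnd_drop (rest.drop (k + 1)) (k + 1 + 1) (l :: rest) rfl
        have hd2 : rest.drop (pvFindEnd (rest.drop (k + 1)) (k + 1))
            = pvSfx (rest.drop (k + 1)) :=
          pvFindEnd_drop (rest.drop (k + 1)) (k + 1) rest rfl
        have hk1 : ¬((k : Int) + 1 < 0) := by omega
        have hk0 : ¬((k : Int) < 0) := by omega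
        have ht1 : ((k : Int) + 1).toNat = k + 1 := by omega
        have hA : restore_todo_default_action_py (l :: rest)
            = l :: restore_todo_default_action_py rest := by
          simp [restore_todo_default_action_py, hfind, hf, hk1, hk0, ht1, hd1, hd2]
        have hsnd := pvAltGo_zero_some rest k hf
        have hB : restore_todo_default_action_py_alt (l :: rest)
            = l :: restore_todo_default_action_py_alt rest := by
          simp [restore_todo_default_action_py_alt, pvAltGo, hc, hsnd]
        rw [hA, hB, ih]

-- ===== VERDICT (by name: the statement is the Claim_ definition above) =====
theorem restore_todo_default_action_py_spec : Claim_equal_restore_todo_default_action_py := by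
  intro lines _
  exact pv_main lines
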